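-- pv_equiv track=rewrite | github.com/ducksouplab/experiment_templates | _lib/groups.py | pair_with_other_half
-- ===== SOURCE A (Python) =====
-- import math
--
-- def pair_with_other_half(num_participants, round_number):
--   num_rounds = math.floor(num_participants/2)
--   round_index = round_number - 1
--
--   pairs = []
--   for id in range(1, num_rounds + 1):
--     other_id = (id + round_index) % num_rounds
--     if other_id == 0:
--       other_id = num_rounds
--     other_id += num_rounds
--     pairs.append([id, other_id])
--   return pairs
-- ===== SOURCE B (Python) =====
-- def pair_with_other_half(num_participants, round_number):
--   num_rounds = num_participants // 2
--   if num_rounds <= 0: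
--     return []
--   second = list(range(num_rounds + 1, 2 * num_rounds + 1))
--   shift = (round_number - 1) % num_rounds
--   rotated = second[shift:] + second[:shift]
--   return [[i + 1, rotated[i]] for i in range(num_rounds)]
-- ===== Notes on version B (the rewrite author's own statement) =====
-- stated objective: alternative
-- what changed: Replaces the per-element modulo-with-zero-adjustment loop by building the second-half block once, rotating it by (round_number-1) % num_rounds via two slices, and zipping first-half ids against the rotated block.
import Mathlib
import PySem

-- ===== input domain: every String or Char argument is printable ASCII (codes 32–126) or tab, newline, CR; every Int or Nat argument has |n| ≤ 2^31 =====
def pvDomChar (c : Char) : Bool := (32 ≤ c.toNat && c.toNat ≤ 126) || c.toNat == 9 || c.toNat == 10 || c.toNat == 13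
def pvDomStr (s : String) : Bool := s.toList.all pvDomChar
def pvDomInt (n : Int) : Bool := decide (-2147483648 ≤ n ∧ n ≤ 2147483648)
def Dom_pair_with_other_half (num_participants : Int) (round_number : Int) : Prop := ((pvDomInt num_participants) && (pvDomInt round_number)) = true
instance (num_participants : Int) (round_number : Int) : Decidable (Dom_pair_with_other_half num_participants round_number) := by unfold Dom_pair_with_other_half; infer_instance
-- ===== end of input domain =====

-- B builds the second-half block once and rotates it with two slices instead of A's per-element
-- modulo-with-zero-adjustment; same O(n) cost, different decomposition (objective: alternative).

-- ===== PORT A =====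
-- math.floor(num_participants/2) is exact integer floor division for |num_participants| ≤ 2^31
-- (float division by 2 is exact below 2^53), so it is ported as PySem.Int.floordiv.
def pair_with_other_half (num_participants : Int) (round_number : Int) : List (List Int) :=
  let num_rounds := PySem.Int.floordiv num_participants 2
  let round_index := round_number - 1
  (PySem.List.pyRange 1 (num_rounds + 1) 1).foldl
    (fun pairs id =>
      let other_id := PySem.Int.mod (id + round_index) num_rounds
      let other_id := if other_id = 0 then num_rounds else other_id
      pairs ++ [[id, other_id + num_rounds]]) []

-- ===== PORT B =====
def pair_with_other_half_alt (num_participants : Int) (round_number : Int) : List (List Int) :=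
  let num_rounds := PySem.Int.floordiv num_participants 2
  if num_rounds ≤ 0 then []
  else
    let second := PySem.List.pyRange (num_rounds + 1) (2 * num_rounds + 1) 1
    let shift := PySem.Int.mod (round_number - 1) num_rounds
    let rotated := PySem.List.slice second (some shift) none ++ PySem.List.slice second none (some shift)
    (PySem.List.pyRange 0 num_rounds 1).map (fun i => [i + 1, PySem.List.pyGetD rotated i 0])

-- ===== PRECONDITION & SPEC =====
def Spec_pair_with_other_half (num_participants : Int) (round_number : Int) (out : List (List Int)) : Prop := out = pair_with_other_half_alt num_participants round_number
instance (num_participants : Int) (round_number : Int) (out : List (List Int)) : Decidable (Spec_pair_with_other_half num_participants round_number out) := by unfold Spec_pair_with_other_half; infer_instance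

-- ===== CLAIM (what is proved, stated in full; the proofs are below) =====
def Claim_equal_pair_with_other_half : Prop := ∀ (num_participants : Int) (round_number : Int), Dom_pair_with_other_half num_participants round_number → Spec_pair_with_other_half num_participants round_number (pair_with_other_half num_participants round_number)

-- ===== LEMMAS AND PROOFS =====

-- t % n for t in [0, 2n) is t or t - n depending on which side of n it lies.
lemma pv_emod_block {t n : Int} (_hn : 0 < n) (h0 : 0 ≤ t) (h2 : t < 2 * n) :
    t % n = if t < n then t else t - n := by
  split_ifs with h
  · exact Int.emod_eq_of_lt h0 h
  · have ht : t = (t - n) + n * 1 := by ring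
    conv_lhs => rw [ht]
    rw [Int.add_mul_emod_self_left, Int.emod_eq_of_lt (by omega) (by omega)]

-- The two ports agree on ALL integer inputs (no Dom needed).
lemma pv_key (np rn : Int) : pair_with_other_half np rn = pair_with_other_half_alt np rn := by
  unfold pair_with_other_half pair_with_other_half_alt
  dsimp only
  set n := PySem.Int.floordiv np 2
  by_cases hpos : n ≤ 0
  · rw [if_pos hpos, PySem.List.pyRange_one_eq_nil (by omega : n + 1 ≤ 1)]
    rfl
  · rw [not_le] at hpos
    rw [if_neg (by omega)]
    rw [PySem.List.foldl_append_singleton_eq_map, List.nil_append]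
    set s := PySem.Int.mod (rn - 1) n with hsdef
    have hs0 : 0 ≤ s := PySem.Int.mod_nonneg _ hpos
    have hsn : s < n := PySem.Int.mod_lt _ hpos
    have hrot : PySem.List.slice (PySem.List.pyRange (n + 1) (2 * n + 1) 1) (some s) none ++
        PySem.List.slice (PySem.List.pyRange (n + 1) (2 * n + 1) 1) none (some s)
        = PySem.List.pyRange (n + 1 + s) (2 * n + 1) 1 ++ PySem.List.pyRange (n + 1) (n + 1 + s) 1 := by
      rw [PySem.List.pyRange_one_append (n+1) (n+1+s) (2*n+1) (by omega) (by omega),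
          PySem.List.slice_from _ hs0, PySem.List.slice_to _ hs0]
      have hl : (PySem.List.pyRange (n+1) (n+1+s) 1).length = s.toNat := by
        rw [PySem.List.length_pyRange_one]; omega
      rw [← hl, List.drop_left, List.take_left]
    rw [hrot]
    apply List.ext_getElem
    · simp [PySem.List.length_pyRange_one]
    · intro j h1 h2
      simp only [List.getElem_map, PySem.List.getElem_pyRange_one]
      have hjn : (j : Int) < n := by
        rw [List.length_map, PySem.List.length_pyRange_one] at h1; omega
      have hmod : PySem.Int.mod (1 + (j:Int) + (rn - 1)) n
          = if 1 + (j:Int) + s < n then 1 + j + s else 1 + j + s - n := by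
        rw [PySem.Int.mod_eq_emod_of_pos hpos]
        have hq : rn - 1 = s + n * ((rn - 1) / n) := by
          rw [hsdef, PySem.Int.mod_eq_emod_of_pos hpos]
          have := Int.emod_add_mul_ediv (rn - 1) n; linarith
        rw [hq]
        have harr : 1 + (j:Int) + (s + n * ((rn - 1) / n)) = (1 + j + s) + n * ((rn-1)/n) := by ring
        rw [harr, Int.add_mul_emod_self_left, pv_emod_block hpos (by omega) (by omega)]
      rw [hmod]
      have hlen1 : (PySem.List.pyRange (n + 1 + s) (2 * n + 1) 1).length = (n - s).toNat := by
        rw [PySem.List.length_pyRange_one]; omega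
      have hlen2 : (PySem.List.pyRange (n + 1) (n + 1 + s) 1).length = s.toNat := by
        rw [PySem.List.length_pyRange_one]; omega
      have hget : PySem.List.pyGetD (PySem.List.pyRange (n + 1 + s) (2 * n + 1) 1 ++ PySem.List.pyRange (n + 1) (n + 1 + s) 1) (0 + (j:Int)) 0
          = if (j:Int) < n - s then n + 1 + s + j else n + 1 + ((j:Int) - (n - s)) := by
        rw [PySem.List.pyGetD_eq_getElem _ 0 (by omega)
              (by rw [List.length_append, hlen1, hlen2]; omega)]
        rw [List.getElem_append]
        split_ifs with h h' h'
        · rw [PySem.List.getElem_pyRange_one]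
          rw [hlen1] at h; omega
        · rw [PySem.List.getElem_pyRange_one]
          rw [hlen1] at h; omega
        · rw [PySem.List.getElem_pyRange_one]
          rw [hlen1] at h; omega
        · rw [PySem.List.getElem_pyRange_one]
          rw [hlen1] at h; simp only [hlen2] at *; omega
      rw [hget]
      split_ifs with hA hB hB <;> simp only [List.cons.injEq, and_true] <;> constructor <;> omega

-- ===== VERDICT (by name: the statement is the Claim_ definition above) =====
theorem pair_with_other_half_spec : Claim_equal_pair_with_other_half := by
  intro np rn _
  unfold Spec_pair_with_other_half
  exact pv_key np rn
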